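-- pv_equiv track=rewrite | github.com/jsklimavicz/model_chromatogram | chromatogram.py | filter_tuples
-- ===== SOURCE A (Python) =====
-- def filter_tuples(input_list):
--     results = []
--     series = []
--     encountered_1 = False
--
--     for tup in input_list:
--         _, b = tup
--
--         if not series:
--             # If series is empty, add the tuple with b == 1 to the series
--             if b == 1:
--                 series.append(tup)
--                 encountered_1 = True
--             continue
--
--         # Check if the current tuple breaks the series
--         if (b == 1 and series[-1][1] == -1) or (b == -1 and series[-1][1] == 1):
--             if not encountered_1:
--                 # If we haven't encountered 1 yet, omit the series
--                 series = []
--             else: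
--                 # Otherwise, apply the rules and add to results
--                 if len(series) > 4 and series[0][1] == 1:
--                     results.extend(series[:2] + series[-2:])
--                 else:
--                     results.extend(series)
--                 series = []
--
--         series.append(tup)
--
--     # Handle the last series
--     if series:
--         if len(series) > 4 and series[0][1] == 1:
--             results.extend(series[:2] + series[-2:])
--         else:
--             results.extend(series)
--
--     # Handle the case where the list starts with a series of b == 1
--     initial_ones_count = 0
--     for tup in input_list:
--         _, b = tup
--         if b == 1:
--             initial_ones_count += 1
--         else: break
--     if initial_ones_count > 2:
--         results = results[initial_ones_count - 2:]
--
--     return results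
-- ===== SOURCE B (Python) =====
-- def filter_tuples(input_list):
--     bs = [b for _, b in input_list]
--     n = len(bs)
--     # index of the first b == 1 (n if there is none)
--     start = next((i for i, b in enumerate(bs) if b == 1), n)
--     # cut positions: start, every exact +1/-1 transition after it, and n
--     cuts = [start]
--     for i in range(start + 1, n):
--         if (bs[i - 1], bs[i]) in ((1, -1), (-1, 1)):
--             cuts.append(i)
--     cuts.append(n)
--     # emit each [lo, hi) block directly as slices of the input
--     out = []
--     for lo, hi in zip(cuts, cuts[1:]):
--         if hi - lo > 4 and bs[lo] == 1:
--             out += input_list[lo:lo + 2] + input_list[hi - 2:hi]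
--         else:
--             out += input_list[lo:hi]
--     # length of the leading run of b == 1 (n if all ones)
--     k = next((i for i, b in enumerate(bs) if b != 1), n)
--     if k > 2:
--         out = out[k - 2:]
--     return out
-- ===== Notes on version B (the rewrite author's own statement) =====
-- stated objective: alternative
-- what changed: Replaces A's one-pass streaming state machine (mutable results/series/encountered_1 flushed at each transition) by index arithmetic: B computes the list of cut positions (first b==1 index, every exact +1/-1 transition, the end), then emits slices of the input between consecutive cut pairs, never materialising a running segment.
import Mathlib
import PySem

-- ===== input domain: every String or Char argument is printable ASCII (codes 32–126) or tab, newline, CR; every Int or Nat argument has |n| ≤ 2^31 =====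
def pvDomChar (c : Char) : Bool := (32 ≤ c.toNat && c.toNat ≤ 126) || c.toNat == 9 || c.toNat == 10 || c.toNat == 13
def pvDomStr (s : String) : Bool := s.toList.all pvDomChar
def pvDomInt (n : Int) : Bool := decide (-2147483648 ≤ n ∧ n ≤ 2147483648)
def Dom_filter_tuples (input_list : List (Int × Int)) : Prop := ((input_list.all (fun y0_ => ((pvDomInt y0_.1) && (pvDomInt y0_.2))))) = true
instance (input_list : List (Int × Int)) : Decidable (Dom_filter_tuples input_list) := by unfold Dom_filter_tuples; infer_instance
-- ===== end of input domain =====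

-- B replaces A's streaming flush-on-transition state machine by index arithmetic: it computes the
-- list of cut positions (first b==1 index, every exact +1/-1 transition, end) and emits slices of
-- the input between consecutive cuts; objective: alternative decomposition, same cost.

-- ===== PORT A =====
-- series[-1][1]; only called on nonempty series
def pvLastA (series : List (Int × Int)) : Int :=
  ((PySem.List.pyGet? series (-1)).getD (0, 0)).2

-- results.extend(series[:2] + series[-2:]) rule of A
def pvFlushA (series : List (Int × Int)) : List (Int × Int) :=
  if series.length > 4 ∧ ((PySem.List.pyGet? series 0).getD (0, 0)).2 = 1 then
    PySem.List.slice series none (some 2) ++ PySem.List.slice series (some (-2)) none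
  else series

-- the body of A's main for-loop; state = (results, series, encountered_1)
def pvStepA (st : List (Int × Int) × List (Int × Int) × Bool) (tup : Int × Int) :
    List (Int × Int) × List (Int × Int) × Bool :=
  let (results, series, enc) := st
  let b := tup.2
  if series.isEmpty then
    if b = 1 then (results, [tup], true) else (results, series, enc)
  else
    if (b = 1 ∧ pvLastA series = -1) ∨ (b = -1 ∧ pvLastA series = 1) then
      if ¬ enc then (results, [tup], enc)
      else (results ++ pvFlushA series, [tup], enc)
    else (results, series ++ [tup], enc)

-- A's second loop: count of leading b == 1 tuples
def pvInitOnesA : List (Int × Int) → Int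
  | [] => 0
  | t :: ts => if t.2 = 1 then 1 + pvInitOnesA ts else 0

def filter_tuples (input_list : List (Int × Int)) : List (Int × Int) :=
  let st := input_list.foldl pvStepA ([], [], false)
  let results := if st.2.1.isEmpty then st.1 else st.1 ++ pvFlushA st.2.1
  let k := pvInitOnesA input_list
  if k > 2 then PySem.List.slice results (some (k - 2)) none else results

-- ===== PORT B =====
-- next((i for i, b in enumerate(bs) if p b), len(bs)): index of the first hit, length if none
def pvNextIdx (p : Int → Bool) : List Int → Int
  | [] => 0
  | b :: rest => if p b then 0 else 1 + pvNextIdx p rest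

-- (bs[i-1], bs[i]) in ((1, -1), (-1, 1))
def pvBrAt (bs : List Int) (i : Int) : Bool :=
  (PySem.List.pyGetD bs (i - 1) 0 == 1 && PySem.List.pyGetD bs i 0 == -1) ||
  (PySem.List.pyGetD bs (i - 1) 0 == -1 && PySem.List.pyGetD bs i 0 == 1)

-- the body of B's emitting loop: one (lo, hi) block, as slices of the input
def pvEmitB (l : List (Int × Int)) (bs : List Int) (c : Int × Int) : List (Int × Int) :=
  if c.2 - c.1 > 4 ∧ PySem.List.pyGetD bs c.1 0 = 1 then
    PySem.List.slice l (some c.1) (some (c.1 + 2)) ++ PySem.List.slice l (some (c.2 - 2)) (some c.2)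
  else PySem.List.slice l (some c.1) (some c.2)

def filter_tuples_alt (input_list : List (Int × Int)) : List (Int × Int) :=
  let bs := input_list.map Prod.snd
  let n : Int := bs.length
  let start := pvNextIdx (fun b => b == 1) bs
  let cuts := (PySem.List.pyRange (start + 1) n 1).foldl
    (fun cs i => if pvBrAt bs i then cs ++ [i] else cs) [start] ++ [n]
  let out := (cuts.zip cuts.tail).foldl (fun r c => r ++ pvEmitB input_list bs c) []
  let k := pvNextIdx (fun b => !(b == 1)) bs
  if k > 2 then PySem.List.slice out (some (k - 2)) none else out

-- ===== PRECONDITION & SPEC =====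
def Spec_filter_tuples (input_list : List (Int × Int)) (out : List (Int × Int)) : Prop := out = filter_tuples_alt input_list
instance (input_list : List (Int × Int)) (out : List (Int × Int)) : Decidable (Spec_filter_tuples input_list out) := by unfold Spec_filter_tuples; infer_instance

-- ===== CLAIM (what is proved, stated in full; the proofs are below) =====
def Claim_equal_filter_tuples : Prop := ∀ (input_list : List (Int × Int)), Dom_filter_tuples input_list → Spec_filter_tuples input_list (filter_tuples input_list)

-- ===== LEMMAS AND PROOFS =====

-- proof-side recursive segmentation (characterises both programs' blocks)
def pvSegsAux (seg : List (Int × Int)) : List (Int × Int) → List (List (Int × Int))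
  | [] => [seg]
  | tup :: rest =>
    if (tup.2 = 1 ∧ pvLastA seg = -1) ∨ (tup.2 = -1 ∧ pvLastA seg = 1) then
      seg :: pvSegsAux [tup] rest
    else pvSegsAux (seg ++ [tup]) rest

def pvSegments : List (Int × Int) → List (List (Int × Int))
  | [] => []
  | t :: ts => if t.2 = 1 then pvSegsAux [t] ts else pvSegments ts

-- B's untrimmed output as a function of the list
def pvCutsRaw (l : List (Int × Int)) : List Int :=
  (PySem.List.pyRange (pvNextIdx (fun b => b == 1) (l.map Prod.snd) + 1) ((l.map Prod.snd).length : Int) 1).foldl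
    (fun cs i => if pvBrAt (l.map Prod.snd) i then cs ++ [i] else cs)
    [pvNextIdx (fun b => b == 1) (l.map Prod.snd)] ++ [((l.map Prod.snd).length : Int)]

def pvOutB (l : List (Int × Int)) : List (Int × Int) :=
  ((pvCutsRaw l).zip (pvCutsRaw l).tail).foldl (fun r c => r ++ pvEmitB l (l.map Prod.snd) c) []

def pvPairs (c : List Int) : List (Int × Int) := c.zip c.tail

def pvCutsF (l : List (Int × Int)) : List Int :=
  pvNextIdx (fun b => b == 1) (l.map Prod.snd) ::
    (PySem.List.pyRange (pvNextIdx (fun b => b == 1) (l.map Prod.snd) + 1) ((l.map Prod.snd).length : Int) 1).filter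
      (pvBrAt (l.map Prod.snd)) ++ [((l.map Prod.snd).length : Int)]

def pvCuts0 (m : List (Int × Int)) : List Int :=
  0 :: (PySem.List.pyRange 1 (m.length : Int) 1).filter (pvBrAt (m.map Prod.snd)) ++ [(m.length : Int)]

-- "no exact +1/-1 transition inside seg"
def pvNoBr (seg : List (Int × Int)) : Prop :=
  List.IsChain (fun a b => ¬ ((b.2 = 1 ∧ a.2 = -1) ∨ (b.2 = -1 ∧ a.2 = 1))) seg

-- ===== A-side: the streaming loop is flatMap pvFlushA over pvSegments =====
theorem main_inv (rest : List (Int × Int)) :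
    ∀ (results series : List (Int × Int)), series ≠ [] →
    (if (rest.foldl pvStepA (results, series, true)).2.1.isEmpty then (rest.foldl pvStepA (results, series, true)).1
     else (rest.foldl pvStepA (results, series, true)).1 ++ pvFlushA (rest.foldl pvStepA (results, series, true)).2.1)
      = results ++ (pvSegsAux series rest).flatMap pvFlushA := by
  induction rest with
  | nil =>
    intro results series hne
    simp [pvSegsAux, hne]
  | cons t ts ih =>
    intro results series hne
    have hse : series.isEmpty = false := by simp [hne]
    by_cases hbr : (t.2 = 1 ∧ pvLastA series = -1) ∨ (t.2 = -1 ∧ pvLastA series = 1)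
    · have : pvStepA (results, series, true) t = (results ++ pvFlushA series, [t], true) := by
        simp [pvStepA, hse, hbr]
      rw [List.foldl_cons, this, ih (results ++ pvFlushA series) [t] (by simp)]
      simp [pvSegsAux, hbr]
    · have : pvStepA (results, series, true) t = (results, series ++ [t], true) := by
        simp [pvStepA, hse, hbr]
      rw [List.foldl_cons, this, ih results (series ++ [t]) (by simp)]
      simp [pvSegsAux, hbr]

theorem untrimmed_A (l : List (Int × Int)) :
    (if (l.foldl pvStepA ([], [], false)).2.1.isEmpty then (l.foldl pvStepA ([], [], false)).1
     else (l.foldl pvStepA ([], [], false)).1 ++ pvFlushA (l.foldl pvStepA ([], [], false)).2.1)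
      = (pvSegments l).flatMap pvFlushA := by
  induction l with
  | nil => simp [pvSegments]
  | cons t ts ih =>
    by_cases h1 : t.2 = 1
    · have : pvStepA ([], [], false) t = ([], [t], true) := by simp [pvStepA, h1]
      rw [List.foldl_cons, this, main_inv ts [] [t] (by simp)]
      simp [pvSegments, h1]
    · have : pvStepA ([], [], false) t = ([], [], false) := by simp [pvStepA, h1]
      rw [List.foldl_cons, this, ih]
      simp [pvSegments, h1]

-- ===== trim counts agree =====
theorem init_eq_next (l : List (Int × Int)) :
    pvInitOnesA l = pvNextIdx (fun b => !(b == 1)) (l.map Prod.snd) := by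
  induction l with
  | nil => rfl
  | cons t ts ih => by_cases h : t.2 = 1 <;> · simp [pvInitOnesA, pvNextIdx, h, ih]

-- ===== generic shift lemmas =====
theorem pvNextIdx_nonneg (p : Int → Bool) (bs : List Int) : 0 ≤ pvNextIdx p bs := by
  induction bs with
  | nil => simp [pvNextIdx]
  | cons b rest ih =>
    by_cases h : p b
    · simp [pvNextIdx, h]
    · simp [pvNextIdx, h]; omega

theorem pvGetD_append (xs ys : List Int) (i d : Int) (h0 : 0 ≤ i) :
    PySem.List.pyGetD (xs ++ ys) ((xs.length : Int) + i) d = PySem.List.pyGetD ys i d := by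
  obtain ⟨k, rfl⟩ : ∃ k : Nat, i = (k : Int) := ⟨i.toNat, by omega⟩
  have h1 : (xs.length : Int) + (k : Int) = ((xs.length + k : Nat) : Int) := by push_cast; ring
  rw [h1, PySem.List.pyGetD_natCast, PySem.List.pyGetD_natCast,
    List.getD_append_right xs ys d _ (by omega)]
  congr 1
  omega

theorem pvGetD_left (xs ys : List Int) (i d : Int) (h0 : 0 ≤ i) (h : i < (xs.length : Int)) :
    PySem.List.pyGetD (xs ++ ys) i d = PySem.List.pyGetD xs i d := by
  obtain ⟨k, rfl⟩ : ∃ k : Nat, i = (k : Int) := ⟨i.toNat, by omega⟩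
  rw [PySem.List.pyGetD_natCast, PySem.List.pyGetD_natCast,
    List.getD_append xs ys d k (by exact_mod_cast h)]

theorem pvBrAt_append (pre bs : List Int) (j : Int) (h : 1 ≤ j) :
    pvBrAt (pre ++ bs) ((pre.length : Int) + j) = pvBrAt bs j := by
  unfold pvBrAt
  rw [show (pre.length : Int) + j - 1 = (pre.length : Int) + (j - 1) by ring,
    pvGetD_append pre bs (j - 1) 0 (by omega), pvGetD_append pre bs j 0 (by omega)]

theorem pvSlice_append {α : Type} (pre rest : List α) (a b : Int) (h0 : 0 ≤ a) (hb : 0 ≤ b) :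
    PySem.List.slice (pre ++ rest) (some ((pre.length : Int) + a)) (some ((pre.length : Int) + b))
      = PySem.List.slice rest (some a) (some b) := by
  rw [PySem.List.slice_toNat _ (by omega) (by omega), PySem.List.slice_toNat _ h0 hb]
  have ha : ((pre.length : Int) + a).toNat = pre.length + a.toNat := by omega
  have hb2 : ((pre.length : Int) + b).toNat = pre.length + b.toNat := by omega
  rw [ha, hb2, List.drop_append]
  have h3 : pre.length + a.toNat - pre.length = a.toNat := by omega
  have h4 : pre.length + b.toNat - (pre.length + a.toNat) = b.toNat - a.toNat := by omega
  rw [h3, h4, List.drop_eq_nil_of_le (by omega), List.nil_append]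

theorem pvEmitB_append (pre rest : List (Int × Int)) (a b : Int) (h0 : 0 ≤ a) (hb : 0 ≤ b) :
    pvEmitB (pre ++ rest) ((pre ++ rest).map Prod.snd) ((pre.length : Int) + a, (pre.length : Int) + b)
      = pvEmitB rest (rest.map Prod.snd) (a, b) := by
  unfold pvEmitB
  have hget : PySem.List.pyGetD ((pre ++ rest).map Prod.snd) ((pre.length : Int) + a) 0
      = PySem.List.pyGetD (rest.map Prod.snd) a 0 := by
    rw [List.map_append, show ((pre.length : Int)) = (((pre.map Prod.snd).length : Nat) : Int) by simp,
      pvGetD_append _ _ _ _ h0]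
  simp only [hget]
  have hcond : ((pre.length : Int) + b) - ((pre.length : Int) + a) = b - a := by ring
  simp only [hcond]
  split_ifs with h
  · rw [show (pre.length : Int) + a + 2 = (pre.length : Int) + (a + 2) by ring,
      show (pre.length : Int) + b - 2 = (pre.length : Int) + (b - 2) by ring,
      pvSlice_append pre rest a (a + 2) h0 (by omega),
      pvSlice_append pre rest (b - 2) b (by omega) hb]
  · exact pvSlice_append pre rest a b h0 hb

theorem pvPairs_map_add (d : Int) (c : List Int) :
    pvPairs (c.map (fun x => d + x)) = (pvPairs c).map (fun p => (d + p.1, d + p.2)) := by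
  unfold pvPairs
  rw [← List.map_tail, List.zip_map]
  rfl

theorem pvFlatMap_congr {α β : Type} (l : List α) (f g : α → List β) (h : ∀ x ∈ l, f x = g x) :
    l.flatMap f = l.flatMap g := by
  induction l with
  | nil => rfl
  | cons x xs ih =>
    simp only [List.flatMap_cons, h x (by simp), ih fun y hy => h y (by simp [hy])]

theorem pvFlat_shift (pre rest : List (Int × Int)) (c : List Int) (hc : ∀ x ∈ c, 0 ≤ x) :
    (pvPairs (c.map (fun x => (pre.length : Int) + x))).flatMap
        (pvEmitB (pre ++ rest) ((pre ++ rest).map Prod.snd))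
      = (pvPairs c).flatMap (pvEmitB rest (rest.map Prod.snd)) := by
  rw [pvPairs_map_add, List.flatMap_map]
  apply pvFlatMap_congr
  intro p hp
  obtain ⟨p1, p2⟩ := p
  have hm := List.of_mem_zip hp
  have h1 : 0 ≤ p1 := hc _ hm.1
  have h2 : 0 ≤ p2 := hc _ (List.mem_of_mem_tail hm.2)
  exact pvEmitB_append pre rest p1 p2 h1 h2

theorem pvRange_shift (d a b : Int) :
    PySem.List.pyRange (d + a) (d + b) 1 = (PySem.List.pyRange a b 1).map (fun x => d + x) := by
  rw [PySem.List.pyRange_one, PySem.List.pyRange_one, List.map_map]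
  have h1 : (d + b) - (d + a) = b - a := by ring
  rw [h1]
  exact List.map_congr_left fun k _ => by simp [Function.comp]; ring

-- ===== structure of the cut list =====
theorem pvOutB_eq_flat (l : List (Int × Int)) :
    pvOutB l = (pvPairs (pvCutsF l)).flatMap (pvEmitB l (l.map Prod.snd)) := by
  have hraw : pvCutsRaw l = pvCutsF l := by
    unfold pvCutsRaw pvCutsF
    rw [PySem.List.foldl_append_if_eq_filter]
    simp
  unfold pvOutB pvPairs
  rw [hraw, PySem.List.foldl_append_eq_flatMap]
  simp

theorem pvFilter_inner_nil (seg : List (Int × Int)) (rest' : List Int) (h : pvNoBr seg) :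
    (PySem.List.pyRange 1 (seg.length : Int) 1).filter (pvBrAt (seg.map Prod.snd ++ rest')) = [] := by
  rw [List.filter_eq_nil_iff]
  intro i hi
  rw [PySem.List.mem_pyRange_one] at hi
  obtain ⟨h1, h2⟩ := hi
  have hlen : i.toNat < seg.length := by omega
  have hj : (i - 1).toNat + 1 = i.toNat := by omega
  have hlt1 : i - 1 < ((seg.map Prod.snd).length : Int) := by simp; omega
  have hlt2 : i < ((seg.map Prod.snd).length : Int) := by simp; omega
  have e1 : PySem.List.pyGetD (seg.map Prod.snd ++ rest') (i - 1) 0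
      = (seg[(i - 1).toNat]'(by omega)).2 := by
    rw [pvGetD_left _ _ _ _ (by omega) hlt1, PySem.List.pyGetD_eq_getElem _ _ (by omega) hlt1]
    simp
  have e2 : PySem.List.pyGetD (seg.map Prod.snd ++ rest') i 0
      = (seg[i.toNat]'(by omega)).2 := by
    rw [pvGetD_left _ _ _ _ (by omega) hlt2, PySem.List.pyGetD_eq_getElem _ _ (by omega) hlt2]
    simp
  have hchain := List.isChain_iff_getElem.mp h (i - 1).toNat (by omega)
  have hee : seg[(i - 1).toNat + 1]'(by omega) = seg[i.toNat]'(by omega) := by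
    have h5 := congrArg (fun n => seg[n]?) hj
    simp only at h5
    rw [List.getElem?_eq_getElem (by omega), List.getElem?_eq_getElem (by omega)] at h5
    exact Option.some.inj h5
  rw [hee] at hchain
  simp only [pvBrAt, e1, e2, Bool.or_eq_true, Bool.and_eq_true, beq_iff_eq]
  rintro (⟨ha, hb⟩ | ⟨ha, hb⟩)
  · exact hchain (Or.inr ⟨hb, ha⟩)
  · exact hchain (Or.inl ⟨hb, ha⟩)

theorem pvLastA_eq (seg : List (Int × Int)) (h : seg ≠ []) : pvLastA seg = (seg.getLast h).2 := by
  unfold pvLastA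
  rw [PySem.List.pyGet?_neg_one, List.getLast?_eq_some_getLast h]
  rfl

theorem pvBrAt_boundary (seg : List (Int × Int)) (b2 : Int) (rest' : List Int) (h : seg ≠ []) :
    (pvBrAt (seg.map Prod.snd ++ b2 :: rest') (seg.length : Int) = true)
      ↔ ((b2 = 1 ∧ pvLastA seg = -1) ∨ (b2 = -1 ∧ pvLastA seg = 1)) := by
  have hL : 1 ≤ (seg.length : Int) := by
    have := List.length_pos_iff.mpr h; omega
  have e2 : PySem.List.pyGetD (seg.map Prod.snd ++ b2 :: rest') (seg.length : Int) 0 = b2 := by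
    rw [show ((seg.length : Nat) : Int) = (((seg.map Prod.snd).length : Nat) : Int) + 0 by simp,
      pvGetD_append _ _ _ _ (by omega)]
    exact PySem.List.pyGetD_zero_cons _ _ _
  have hlt1 : (seg.length : Int) - 1 < ((seg.map Prod.snd).length : Int) := by
    rw [List.length_map]; omega
  have e1 : PySem.List.pyGetD (seg.map Prod.snd ++ b2 :: rest') ((seg.length : Int) - 1) 0 = pvLastA seg := by
    rw [pvGetD_left _ _ _ _ (by omega) hlt1, PySem.List.pyGetD_eq_getElem _ _ (by omega) hlt1]
    rw [pvLastA_eq seg h, List.getLast_eq_getElem]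
    have h9 : ((seg.length : Int) - 1).toNat = seg.length - 1 := by omega
    simp [h9]
  simp only [pvBrAt, e1, e2]
  simp only [Bool.or_eq_true, Bool.and_eq_true, beq_iff_eq]
  tauto

-- ===== the head block of a segment emits pvFlushA of it =====
theorem pvEmit_head (seg rest : List (Int × Int)) (h : seg ≠ []) :
    pvEmitB (seg ++ rest) ((seg ++ rest).map Prod.snd) (0, (seg.length : Int)) = pvFlushA seg := by
  unfold pvEmitB pvFlushA
  have hg0 : PySem.List.pyGetD ((seg ++ rest).map Prod.snd) 0 0 = ((PySem.List.pyGet? seg 0).getD (0, 0)).2 := by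
    cases seg with
    | nil => exact absurd rfl h
    | cons s ss => simp [PySem.List.pyGetD_zero_cons]
  simp only [hg0]
  by_cases hc : seg.length > 4 ∧ ((PySem.List.pyGet? seg 0).getD (0, 0)).2 = 1
  · rw [if_pos (show ((0 : Int), (seg.length : Int)).2 - ((0 : Int), (seg.length : Int)).1 > 4 ∧ _ from ⟨by simp; omega, hc.2⟩),
      if_pos hc]
    have s1 : PySem.List.slice (seg ++ rest) (some ((0 : Int))) (some ((0 : Int) + 2)) = PySem.List.slice seg none (some 2) := by
      rw [PySem.List.slice_zero_start, PySem.List.slice_to _ (by norm_num), PySem.List.slice_to _ (by norm_num)]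
      norm_num
      exact Or.inr (by omega)
    have s2 : PySem.List.slice (seg ++ rest) (some ((seg.length : Int) - 2)) (some (seg.length : Int)) = PySem.List.slice seg (some (-2)) none := by
      rw [PySem.List.slice_from_neg_ofNat seg 2 (by norm_num),
        PySem.List.slice_toNat _ (by omega) (by omega)]
      have h1 : ((seg.length : Int) - 2).toNat = seg.length - 2 := by omega
      have h2 : ((seg.length : Nat) : Int).toNat = seg.length := by omega
      rw [h1, h2, List.drop_append]
      have h3 : seg.length - 2 - seg.length = 0 := by omega
      rw [h3, List.drop_zero]
      have h4 : seg.length - (seg.length - 2) = 2 := by omega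
      rw [h4, List.take_append]
      have h5 : (seg.drop (seg.length - 2)).length = 2 := by simp; omega
      rw [List.take_of_length_le (by omega)]
      have h6 : 2 - (seg.drop (seg.length - 2)).length = 0 := by omega
      rw [h6, List.take_zero, List.append_nil]
    rw [s1, s2]
  · rw [if_neg, if_neg hc]
    · rw [PySem.List.slice_zero_start, PySem.List.slice_to _ (by omega)]
      have h2 : ((seg.length : Nat) : Int).toNat = seg.length := by omega
      rw [h2, List.take_append_of_le_length (le_refl _), List.take_length]
    · intro hcon
      apply hc
      refine ⟨?_, hcon.2⟩
      have := hcon.1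
      simp at this
      omega

-- ===== nonnegativity of cut entries =====
theorem pvCuts0_nonneg (m : List (Int × Int)) : ∀ x ∈ pvCuts0 m, 0 ≤ x := by
  intro x hx
  unfold pvCuts0 at hx
  rcases List.mem_cons.mp hx with h | h
  · omega
  · rcases List.mem_append.mp h with h2 | h2
    · have h3 := List.mem_of_mem_filter h2
      rw [PySem.List.mem_pyRange_one] at h3
      omega
    · have h3 : x = ((m.length : Nat) : Int) := by simpa using h2
      omega

theorem pvCutsF_nonneg (l : List (Int × Int)) : ∀ x ∈ pvCutsF l, 0 ≤ x := by
  intro x hx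
  unfold pvCutsF at hx
  have hnn := pvNextIdx_nonneg (fun b => b == 1) (l.map Prod.snd)
  rcases List.mem_cons.mp hx with h | h
  · omega
  · rcases List.mem_append.mp h with h2 | h2
    · have h3 := List.mem_of_mem_filter h2
      rw [PySem.List.mem_pyRange_one] at h3
      omega
    · have h3 : x = (((l.map Prod.snd).length : Nat) : Int) := by simpa using h2
      omega

-- ===== cut list of a list starting with a maximal no-break block =====
theorem pvCuts0_break (seg : List (Int × Int)) (t : Int × Int) (ts : List (Int × Int))
    (hne : seg ≠ []) (hnb : pvNoBr seg)
    (hbr : (t.2 = 1 ∧ pvLastA seg = -1) ∨ (t.2 = -1 ∧ pvLastA seg = 1)) :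
    pvCuts0 (seg ++ t :: ts) = 0 :: (pvCuts0 (t :: ts)).map (fun x => (seg.length : Int) + x) := by
  unfold pvCuts0
  have hL : 1 ≤ (seg.length : Int) := by
    have := List.length_pos_iff.mpr hne; omega
  have hlen : (((seg ++ t :: ts).length : Nat) : Int) = (seg.length : Int) + (((t :: ts).length : Nat) : Int) := by
    push_cast [List.length_append]
    ring_nf
  have hmap : (seg ++ t :: ts).map Prod.snd = seg.map Prod.snd ++ t.2 :: ts.map Prod.snd := by simp
  have hm1 : (1 : Int) ≤ (((t :: ts).length : Nat) : Int) := by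
    have : 1 ≤ (t :: ts).length := by simp
    omega
  rw [hlen, hmap]
  rw [PySem.List.pyRange_one_append 1 (seg.length : Int) ((seg.length : Int) + (((t :: ts).length : Nat) : Int)) hL (by omega)]
  rw [List.filter_append, pvFilter_inner_nil seg _ hnb]
  rw [PySem.List.pyRange_one_cons (by omega)]
  rw [List.filter_cons, if_pos ((pvBrAt_boundary seg t.2 (ts.map Prod.snd) hne).mpr hbr)]
  rw [pvRange_shift (seg.length : Int) 1 (((t :: ts).length : Nat) : Int)]
  rw [List.filter_map]
  have hfc : List.filter (pvBrAt (seg.map Prod.snd ++ t.2 :: ts.map Prod.snd) ∘ fun x => (seg.length : Int) + x)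
        (PySem.List.pyRange 1 (((t :: ts).length : Nat) : Int) 1)
      = List.filter (pvBrAt ((t :: ts).map Prod.snd)) (PySem.List.pyRange 1 (((t :: ts).length : Nat) : Int) 1) := by
    apply List.filter_congr
    intro j hj
    rw [PySem.List.mem_pyRange_one] at hj
    simp only [Function.comp_apply]
    rw [show (seg.length : Int) = (((seg.map Prod.snd).length : Nat) : Int) by simp]
    rw [pvBrAt_append (seg.map Prod.snd) (t.2 :: ts.map Prod.snd) j hj.1]
    simp
  rw [hfc]
  simp [List.map_append]

-- ===== the main correspondence =====
theorem pvMain (rest : List (Int × Int)) :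
    ∀ (seg : List (Int × Int)), seg ≠ [] → pvNoBr seg →
    (pvPairs (pvCuts0 (seg ++ rest))).flatMap (pvEmitB (seg ++ rest) ((seg ++ rest).map Prod.snd))
      = (pvSegsAux seg rest).flatMap pvFlushA := by
  induction rest with
  | nil =>
    intro seg hne hnb
    simp only [List.append_nil]
    have hfil := pvFilter_inner_nil seg [] hnb
    rw [List.append_nil] at hfil
    have hcuts : pvCuts0 seg = [0, (seg.length : Int)] := by
      unfold pvCuts0
      rw [hfil]
      rfl
    rw [hcuts]
    show pvEmitB seg (seg.map Prod.snd) (0, (seg.length : Int)) ++ [] = _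
    rw [List.append_nil]
    have he := pvEmit_head seg [] hne
    rw [List.append_nil] at he
    rw [he]
    simp [pvSegsAux]
  | cons t ts ih =>
    intro seg hne hnb
    by_cases hbr : (t.2 = 1 ∧ pvLastA seg = -1) ∨ (t.2 = -1 ∧ pvLastA seg = 1)
    · rw [pvCuts0_break seg t ts hne hnb hbr]
      obtain ⟨w, hw⟩ : ∃ w, pvCuts0 (t :: ts) = 0 :: w := ⟨_, rfl⟩
      rw [hw]
      simp only [List.map_cons, add_zero]
      have hpp : pvPairs (0 :: (seg.length : Int) :: w.map (fun x => (seg.length : Int) + x))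
          = (0, (seg.length : Int)) :: pvPairs ((seg.length : Int) :: w.map (fun x => (seg.length : Int) + x)) := rfl
      rw [hpp, List.flatMap_cons]
      rw [pvEmit_head seg (t :: ts) hne]
      have hmapcons : ((seg.length : Int) :: w.map (fun x => (seg.length : Int) + x))
          = (0 :: w).map (fun x => (seg.length : Int) + x) := by simp
      rw [hmapcons, ← hw]
      rw [pvFlat_shift seg (t :: ts) (pvCuts0 (t :: ts)) (pvCuts0_nonneg _)]
      have hih := ih [t] (by simp) (List.isChain_singleton _)
      simp only [List.singleton_append] at hih
      rw [hih]
      have : pvSegsAux seg (t :: ts) = seg :: pvSegsAux [t] ts := by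
        rw [pvSegsAux]; simp [hbr]
      rw [this, List.flatMap_cons]
    · have hstep : pvSegsAux seg (t :: ts) = pvSegsAux (seg ++ [t]) ts := by
        rw [pvSegsAux]; simp [hbr]
      have hassoc : seg ++ t :: ts = (seg ++ [t]) ++ ts := by simp
      rw [hstep, hassoc]
      apply ih (seg ++ [t]) (by simp)
      apply hnb.append (List.isChain_singleton _)
      intro x hx y hy
      rw [List.getLast?_eq_some_getLast hne] at hx
      simp only [Option.mem_def, Option.some_inj] at hx
      simp only [List.head?_cons, Option.mem_def, Option.some_inj] at hy
      subst hx; subst hy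
      rw [← pvLastA_eq seg hne]
      exact hbr

-- ===== B's untrimmed output is the same flatMap =====
theorem outB_eq (l : List (Int × Int)) : pvOutB l = (pvSegments l).flatMap pvFlushA := by
  induction l with
  | nil => rfl
  | cons x xs ih =>
    by_cases hx : x.2 = 1
    · rw [pvOutB_eq_flat]
      have hc : pvCutsF (x :: xs) = pvCuts0 (x :: xs) := by
        unfold pvCutsF pvCuts0
        simp [pvNextIdx, hx]
      rw [hc]
      have := pvMain xs [x] (by simp) (List.isChain_singleton _)
      simp only [List.singleton_append] at this
      rw [this]
      simp [pvSegments, hx]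
    · rw [pvOutB_eq_flat]
      have hshift : pvCutsF (x :: xs) = (pvCutsF xs).map (fun y => (1 : Int) + y) := by
        unfold pvCutsF
        have hs : pvNextIdx (fun b => b == 1) ((x :: xs).map Prod.snd)
            = 1 + pvNextIdx (fun b => b == 1) (xs.map Prod.snd) := by
          simp [pvNextIdx, hx]
        have hn : (((x :: xs).map Prod.snd).length : Int) = 1 + ((xs.map Prod.snd).length : Int) := by
          simp
          omega
        rw [hs, hn]
        rw [show 1 + pvNextIdx (fun b => b == 1) (xs.map Prod.snd) + 1
            = 1 + (pvNextIdx (fun b => b == 1) (xs.map Prod.snd) + 1) by ring]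
        rw [pvRange_shift 1 (pvNextIdx (fun b => b == 1) (xs.map Prod.snd) + 1) ((xs.map Prod.snd).length : Int)]
        rw [List.filter_map]
        have hfc : List.filter (pvBrAt ((x :: xs).map Prod.snd) ∘ fun y => (1 : Int) + y)
              (PySem.List.pyRange (pvNextIdx (fun b => b == 1) (xs.map Prod.snd) + 1) ((xs.map Prod.snd).length : Int) 1)
            = List.filter (pvBrAt (xs.map Prod.snd))
              (PySem.List.pyRange (pvNextIdx (fun b => b == 1) (xs.map Prod.snd) + 1) ((xs.map Prod.snd).length : Int) 1) := by
          apply List.filter_congr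
          intro j hj
          rw [PySem.List.mem_pyRange_one] at hj
          have hnn := pvNextIdx_nonneg (fun b => b == 1) (xs.map Prod.snd)
          simp only [Function.comp_apply]
          rw [show ((x :: xs).map Prod.snd) = [x.2] ++ xs.map Prod.snd by simp]
          rw [show (1 : Int) = (([x.2] : List Int).length : Int) by simp]
          rw [pvBrAt_append [x.2] (xs.map Prod.snd) j (by omega)]
        rw [hfc]
        simp [List.map_append]
      rw [hshift]
      rw [show ((1 : Int)) = (([x] : List (Int × Int)).length : Int) by simp]
      rw [show (x :: xs) = [x] ++ xs by simp]
      rw [pvFlat_shift [x] xs (pvCutsF xs) (pvCutsF_nonneg xs)]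
      rw [← pvOutB_eq_flat, ih]
      simp [pvSegments, hx]

-- ===== VERDICT (by name: the statement is the Claim_ definition above) =====
theorem filter_tuples_spec : Claim_equal_filter_tuples := by
  intro l _
  show filter_tuples l = filter_tuples_alt l
  have hB : filter_tuples_alt l
      = (if pvNextIdx (fun b => !(b == 1)) (l.map Prod.snd) > 2 then
          PySem.List.slice (pvOutB l) (some (pvNextIdx (fun b => !(b == 1)) (l.map Prod.snd) - 2)) none
        else pvOutB l) := rfl
  rw [hB, outB_eq, ← init_eq_next]
  simp only [filter_tuples]
  rw [untrimmed_A]
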